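-- pv_equiv track=rewrite | github.com/sunnytake/CodeAndDecode | 左神/面试题/随机课/字符串字序列.py | isCountEqual
-- ===== SOURCE A (Python) =====
-- def isCountEqual(string, start, aim):
--     chars = [0]*256
--     for char in string[start: start+len(aim)]:
--         chars[ord(char)] += 1
--
--     for char in aim:
--         if chars[ord(char)] == 0:
--             return False
--         chars[ord(char)] -= 1
--     return True
-- ===== SOURCE B (Python) =====
-- def isCountEqual(string, start, aim):
--     sub = string[start: start + len(aim)]
--     return all(aim.count(c) <= sub.count(c) for c in aim)
-- ===== Notes on version B (the rewrite author's own statement) =====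
-- stated objective: simpler
-- what changed: Replaces the 256-slot tally array and destructive consume loop with early exit by a direct per-character count comparison: B takes the same slice and checks all(aim.count(c) <= sub.count(c) for c in aim).
import Mathlib
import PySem

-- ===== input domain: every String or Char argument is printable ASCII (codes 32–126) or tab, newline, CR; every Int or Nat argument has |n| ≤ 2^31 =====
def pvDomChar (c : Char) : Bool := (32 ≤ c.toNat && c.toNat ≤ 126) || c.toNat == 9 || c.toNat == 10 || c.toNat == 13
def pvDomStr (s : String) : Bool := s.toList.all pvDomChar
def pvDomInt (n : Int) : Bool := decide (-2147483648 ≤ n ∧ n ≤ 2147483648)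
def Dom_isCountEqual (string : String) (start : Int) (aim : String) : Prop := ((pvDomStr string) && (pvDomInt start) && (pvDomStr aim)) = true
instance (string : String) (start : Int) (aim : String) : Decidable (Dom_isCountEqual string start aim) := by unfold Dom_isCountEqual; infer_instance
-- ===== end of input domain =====

-- B replaces A's 256-slot tally array and destructive consume loop (with early exit)
-- by a direct per-character count comparison over the same slice; objective: simpler.

-- ===== PORT A =====
-- second loop of A: early-return consumption of the tally
def pvConsume (chars : List Int) : List Char → Bool
  | [] => true
  | c :: rest =>
    if chars.getD c.toNat 0 = 0 then false
    else pvConsume (chars.set c.toNat (chars.getD c.toNat 0 - 1)) rest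

def isCountEqual (string : String) (start : Int) (aim : String) : Bool :=
  let chars : List Int := List.replicate 256 0
  let chars := (PySem.List.slice string.toList (some start)
      (some (start + (aim.toList.length : Int)))).foldl
      (fun ch c => ch.set c.toNat (ch.getD c.toNat 0 + 1)) chars
  pvConsume chars aim.toList

-- ===== PORT B =====
def isCountEqual_alt (string : String) (start : Int) (aim : String) : Bool :=
  let sub := PySem.List.slice string.toList (some start)
      (some (start + (aim.toList.length : Int)))
  aim.toList.all (fun c => decide (aim.toList.count c ≤ sub.count c))

-- ===== PRECONDITION & SPEC =====
def Spec_isCountEqual (string : String) (start : Int) (aim : String) (out : Bool) : Prop := out = isCountEqual_alt string start aim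
instance (string : String) (start : Int) (aim : String) (out : Bool) : Decidable (Spec_isCountEqual string start aim out) := by unfold Spec_isCountEqual; infer_instance

-- ===== CLAIM (what is proved, stated in full; the proofs are below) =====
def Claim_equal_isCountEqual : Prop := ∀ (string : String) (start : Int) (aim : String), Dom_isCountEqual string start aim → Spec_isCountEqual string start aim (isCountEqual string start aim)

-- ===== LEMMAS AND PROOFS =====

theorem pv_char_toNat_inj {x c : Char} (h : x.toNat = c.toNat) : x = c := by
  apply Char.ext
  exact UInt32.toNat_inj.mp h

theorem pv_countP_toNat_eq_count (t : List Char) (c : Char) :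
    t.countP (fun x => x.toNat == c.toNat) = t.count c := by
  rw [List.count_eq_countP]
  apply List.countP_congr
  intro x _
  by_cases h : x = c
  · simp [h]
  · have h2 : ¬ x.toNat = c.toNat := fun hh => h (pv_char_toNat_inj hh)
    simp [h, h2]

-- the tally after the first loop, at any index below 256
theorem pv_getD_set (l : List Int) (j i : Nat) (v : Int) (hj : j < l.length) :
    (l.set j v).getD i 0 = if j = i then v else l.getD i 0 := by
  by_cases h : j = i
  · subst h
    simp [List.getD, List.getElem?_set, hj]
  · simp [List.getD, List.getElem?_set, h]

theorem pv_tally_getD (s : List Char) (tally : List Int)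
    (hlen : tally.length = 256) (hs : ∀ c ∈ s, c.toNat < 256) (i : Nat) (hi : i < 256) :
    (s.foldl (fun ch c => ch.set c.toNat (ch.getD c.toNat 0 + 1)) tally).getD i 0
      = tally.getD i 0 + (s.countP (fun c => c.toNat == i) : Int) := by
  induction s generalizing tally with
  | nil => simp
  | cons c s ih =>
    have hc : c.toNat < 256 := hs c (by simp)
    have hlen' : (tally.set c.toNat (tally.getD c.toNat 0 + 1)).length = 256 := by
      simp [hlen]
    rw [List.foldl_cons, ih _ hlen' (fun x hx => hs x (by simp [hx])),
        pv_getD_set tally c.toNat i _ (by omega), List.countP_cons]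
    by_cases hci : c.toNat = i
    · subst hci
      simp only [if_pos rfl, beq_self_eq_true, if_pos]
      push_cast
      ring
    · have : (c.toNat == i) = false := by simp [hci]
      simp [hci, this]

-- A's consume loop succeeds iff every tally bucket covers aim's demand
theorem pv_consume_iff (t : List Char) (chars : List Int)
    (hlen : chars.length = 256) (ht : ∀ c ∈ t, c.toNat < 256)
    (hnn : ∀ i, i < 256 → 0 ≤ chars.getD i 0) :
    pvConsume chars t = true ↔
      ∀ i, i < 256 → (t.countP (fun c => c.toNat == i) : Int) ≤ chars.getD i 0 := by
  induction t generalizing chars with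
  | nil =>
    simp [pvConsume]
    intro i hi
    exact hnn i hi
  | cons c rest ih =>
    have hc : c.toNat < 256 := ht c (by simp)
    rw [pvConsume]
    by_cases h0 : chars.getD c.toNat 0 = 0
    · rw [if_pos h0]
      constructor
      · intro h; cases h
      · intro h
        exfalso
        have h1 := h c.toNat hc
        rw [List.countP_cons, h0] at h1
        simp at h1
        omega
    · rw [if_neg h0]
      have hset : ∀ i, (chars.set c.toNat (chars.getD c.toNat 0 - 1)).getD i 0
          = if c.toNat = i then chars.getD c.toNat 0 - 1 else chars.getD i 0 :=
        fun i => pv_getD_set chars c.toNat i _ (by omega)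
      have hnn' : ∀ i, i < 256 → 0 ≤ (chars.set c.toNat (chars.getD c.toNat 0 - 1)).getD i 0 := by
        intro i hi
        rw [hset i]
        by_cases hci : c.toNat = i
        · rw [if_pos hci]
          have := hnn c.toNat hc
          omega
        · rw [if_neg hci]
          exact hnn i hi
      rw [ih _ (by simp [hlen]) (fun x hx => ht x (by simp [hx])) hnn']
      constructor
      · intro h i hi
        have h1 := h i hi
        rw [hset i] at h1
        rw [List.countP_cons]
        by_cases hci : c.toNat = i
        · subst hci
          rw [if_pos rfl] at h1
          simp only [beq_self_eq_true, if_pos]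
          push_cast
          push_cast at h1
          omega
        · rw [if_neg hci] at h1
          have hb : (c.toNat == i) = false := by simp [hci]
          rw [hb]
          simpa using h1
      · intro h i hi
        have h1 := h i hi
        rw [List.countP_cons] at h1
        rw [hset i]
        by_cases hci : c.toNat = i
        · subst hci
          rw [if_pos rfl]
          simp only [beq_self_eq_true, if_pos] at h1
          push_cast at h1
          omega
        · rw [if_neg hci]
          have hb : (c.toNat == i) = false := by simp [hci]
          rw [hb] at h1
          simpa using h1

-- ===== VERDICT (by name: the statement is the Claim_ definition above) =====
theorem pv_foldl_tally_length (s : List Char) (tally : List Int) :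
    (s.foldl (fun ch c => ch.set c.toNat (ch.getD c.toNat 0 + 1)) tally).length
      = tally.length := by
  induction s generalizing tally with
  | nil => rfl
  | cons c s ih =>
    rw [List.foldl_cons, ih]
    simp

theorem isCountEqual_spec : Claim_equal_isCountEqual := by
  intro string start aim hdom
  unfold Spec_isCountEqual isCountEqual isCountEqual_alt
  have hchar : ∀ (s : String), pvDomStr s = true → ∀ c ∈ s.toList, c.toNat < 256 := by
    intro s hs c hc
    have := List.all_eq_true.mp hs c hc
    unfold pvDomChar at this
    simp at this
    omega
  have hdom' : pvDomStr string = true ∧ pvDomInt start = true ∧ pvDomStr aim = true := by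
    unfold Dom_isCountEqual at hdom
    simp at hdom
    tauto
  have hdomT : ∀ c ∈ aim.toList, c.toNat < 256 := hchar aim hdom'.2.2
  have hdomSub : ∀ c ∈ PySem.List.slice string.toList (some start)
      (some (start + (aim.toList.length : Int))), c.toNat < 256 :=
    fun c hc => hchar string hdom'.1 c (PySem.List.mem_of_mem_slice _ _ _ hc)
  set sub := PySem.List.slice string.toList (some start)
      (some (start + (aim.toList.length : Int))) with hsubdef
  have htget : ∀ i, i < 256 →
      (sub.foldl (fun ch c => ch.set c.toNat (ch.getD c.toNat 0 + 1))
        (List.replicate 256 (0 : Int))).getD i 0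
      = (sub.countP (fun c => c.toNat == i) : Int) := by
    intro i hi
    rw [pv_tally_getD sub _ (List.length_replicate) hdomSub i hi]
    have hz : (List.replicate 256 (0 : Int)).getD i 0 = 0 := by
      rw [List.getD_eq_getElem?_getD, List.getElem?_replicate, if_pos hi, Option.getD_some]
    rw [hz, zero_add]
  have hnn : ∀ i, i < 256 →
      0 ≤ (sub.foldl (fun ch c => ch.set c.toNat (ch.getD c.toNat 0 + 1))
        (List.replicate 256 (0 : Int))).getD i 0 := by
    intro i hi
    rw [htget i hi]
    positivity
  apply Bool.eq_iff_iff.mpr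
  rw [pv_consume_iff aim.toList _ (by rw [pv_foldl_tally_length, List.length_replicate]) hdomT hnn,
      List.all_eq_true]
  constructor
  · intro h c hc
    have h1 := h c.toNat (hdomT c hc)
    rw [htget c.toNat (hdomT c hc), pv_countP_toNat_eq_count,
        pv_countP_toNat_eq_count] at h1
    simp only [decide_eq_true_eq]
    exact_mod_cast h1
  · intro h i hi
    rw [htget i hi]
    by_cases hex : ∃ c, c ∈ aim.toList ∧ c.toNat = i
    · obtain ⟨c, hc, rfl⟩ := hex
      rw [pv_countP_toNat_eq_count, pv_countP_toNat_eq_count]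
      have h1 := h c hc
      simp only [decide_eq_true_eq] at h1
      exact_mod_cast h1
    · have hz : (aim.toList).countP (fun x => x.toNat == i) = 0 := by
        apply List.countP_eq_zero.mpr
        intro c hc
        simp only [beq_iff_eq]
        exact fun h' => hex ⟨c, hc, h'⟩
      rw [hz]
      positivity
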